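-- pv_equiv track=rewrite | github.com/duminyth/Usefull_Functions | BookOfAbstract/Create_BOA.py | make_custom_toc
-- ===== SOURCE A (Python) =====
-- AREA_ORDER  	= ["Plenary","Damage Mechanics","Optimization & Dynamic Response", "Delamination & Impact", "Novel Approaches", "Fracture Mechanics","Thin Ply", "Buckling / Stability","Structures","Multi-scale modeling","Novel Materials","Machine Learning I","Machine Learning II"]
--
-- _LATEX_SPECIALS = {
-- 		"\\": r"\textbackslash{}",
-- 		"&": r"\&",
-- 		"%": r"\%",
-- 		"$": r"\$",
-- 		"#": r"\#",
-- 		"_": r"\_",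
-- 		"{": r"\{",
-- 		"}": r"\}",
-- 		"~": r"\textasciitilde{}",
-- 		"^": r"\textasciicircum{}",
-- }
--
-- def make_custom_toc(entries: list[dict]) -> list[str]:
-- 	"""
-- 	entries: list of dicts with keys:
-- 	- area
-- 	- id
-- 	- label
-- 	- main_author
-- 	- title
--
-- 	Produces a multi-page TOC grouped by AREA_ORDER.
-- 	"""
-- 	parts = []
-- 	parts.append(r"\pagestyle{empty}")
-- 	parts.append(r"\begin{center}")
-- 	parts.append(r"\LARGE Table of Contents")
-- 	parts.append(r"\end{center}")
-- 	parts.append(r"\vspace{1em}")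
--
-- 	# More spacing between rows
-- 	parts.append(r"\renewcommand{\arraystretch}{1.35}")
-- 	parts.append(r"\setlength{\tabcolsep}{6pt}")
--
-- 	# 3 columns: Author | Title | Page
-- 	parts.append(r"\noindent\begin{longtable}{@{}>{\bfseries}p{0.28\textwidth} p{0.62\textwidth} r@{}}")
--
-- 	# (Optional) header row repeated on page breaks
-- 	parts.append(r"\textbf{Author} & \textbf{Title} & \textbf{Page}\\")
-- 	parts.append(r"\hline")
-- 	parts.append(r"\endfirsthead")
-- 	parts.append(r"\textbf{Author} & \textbf{Title} & \textbf{Page}\\")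
-- 	parts.append(r"\hline")
-- 	parts.append(r"\endhead")
--
-- 	# Group entries by area (preserve order within each area)
-- 	by_area: dict[str, list[dict]] = {a: [] for a in AREA_ORDER}
-- 	for e in entries:
-- 		a = e.get("area", "")
-- 		if a in by_area:
-- 			by_area[a].append(e)
--
-- 	for area in AREA_ORDER:
-- 		if not by_area[area]:
-- 			continue
--
-- 		# Session header row spanning all 3 columns
-- 		area_tex = latex_escape(area)
-- 		parts.append(r"\multicolumn{3}{@{}l@{}}{\Large\bfseries %s}\\[4pt]" % area_tex)
-- 		parts.append(r"\hline")
-- 		parts.append(r"\noalign{\vskip 4pt}")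
-- 		# Entries for that session
-- 		for e in by_area[area]:
-- 			ma = latex_escape(e["main_author"])
-- 			ti = latex_escape(e["title"])
-- 			link = r"\hyperlink{%s}{%s}" % (e["id"], ti)
-- 			page = r"\pageref{%s}" % e["label"]
--
-- 			parts.append(r"%s & %s & %s \\" % (ma, link, page))
-- 			parts.append(r"\noalign{\vskip 3pt}")  # extra spacing between entries
--
-- 		# Extra space between sessions
-- 		parts.append(r"\noalign{\vskip 8pt}")
--
-- 	parts.append(r"\end{longtable}")
-- 	parts.append(r"\clearpage")
-- 	parts.append(r"\pagestyle{fancy}")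
-- 	return parts
--
-- def latex_escape(text: str) -> str:
-- 		"""Escape LaTeX special characters, but keep normal Unicode."""
-- 		if text is None:
-- 				return ""
-- 		text = text.replace("\r\n", "\n").replace("\r", "\n")
-- 		return "".join(_LATEX_SPECIALS.get(ch, ch) for ch in text)
-- ===== SOURCE B (Python) =====
-- AREA_ORDER  	= ["Plenary","Damage Mechanics","Optimization & Dynamic Response", "Delamination & Impact", "Novel Approaches", "Fracture Mechanics","Thin Ply", "Buckling / Stability","Structures","Multi-scale modeling","Novel Materials","Machine Learning I","Machine Learning II"]
--
-- _LATEX_SPECIALS = {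
-- 		"\\": r"\textbackslash{}",
-- 		"&": r"\&",
-- 		"%": r"\%",
-- 		"$": r"\$",
-- 		"#": r"\#",
-- 		"_": r"\_",
-- 		"{": r"\{",
-- 		"}": r"\}",
-- 		"~": r"\textasciitilde{}",
-- 		"^": r"\textasciicircum{}",
-- }
--
-- _HEADER = [
-- 	r"\pagestyle{empty}",
-- 	r"\begin{center}",
-- 	r"\LARGE Table of Contents",
-- 	r"\end{center}",
-- 	r"\vspace{1em}",
-- 	r"\renewcommand{\arraystretch}{1.35}",
-- 	r"\setlength{\tabcolsep}{6pt}",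
-- 	r"\noindent\begin{longtable}{@{}>{\bfseries}p{0.28\textwidth} p{0.62\textwidth} r@{}}",
-- 	r"\textbf{Author} & \textbf{Title} & \textbf{Page}\\",
-- 	r"\hline",
-- 	r"\endfirsthead",
-- 	r"\textbf{Author} & \textbf{Title} & \textbf{Page}\\",
-- 	r"\hline",
-- 	r"\endhead",
-- ]
--
-- _FOOTER = [r"\end{longtable}", r"\clearpage", r"\pagestyle{fancy}"]
--
--
-- def latex_escape(text: str) -> str:
-- 	if text is None:
-- 		return ""
-- 	text = text.replace("\r\n", "\n").replace("\r", "\n")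
-- 	return "".join(_LATEX_SPECIALS.get(ch, ch) for ch in text)
--
--
-- def _row(e: dict) -> str:
-- 	ma = latex_escape(e["main_author"])
-- 	link = r"\hyperlink{%s}{%s}" % (e["id"], latex_escape(e["title"]))
-- 	page = r"\pageref{%s}" % e["label"]
-- 	return r"%s & %s & %s \\" % (ma, link, page)
--
--
-- def _block(area: str, entries: list) -> list:
-- 	"""Lines for one session: header row + rows, or [] if no entry has this area."""
-- 	group = [e for e in entries if e.get("area", "") == area]
-- 	if not group:
-- 		return []
-- 	return (
-- 		[r"\multicolumn{3}{@{}l@{}}{\Large\bfseries %s}\\[4pt]" % latex_escape(area),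
-- 		 r"\hline",
-- 		 r"\noalign{\vskip 4pt}"]
-- 		+ [line for e in group for line in (_row(e), r"\noalign{\vskip 3pt}")]
-- 		+ [r"\noalign{\vskip 8pt}"]
-- 	)
--
--
-- def make_custom_toc(entries: list) -> list:
-- 	return _HEADER + [line for area in AREA_ORDER for line in _block(area, entries)] + _FOOTER
-- ===== Notes on version B (the rewrite author's own statement) =====
-- stated objective: simpler
-- what changed: B drops A's pre-built by_area dict entirely: it filters `entries` inline per area inside the AREA_ORDER loop and assembles the result as header ++ per-area blocks ++ footer, instead of A's index-build pass plus mutable parts accumulator.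
import Mathlib
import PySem

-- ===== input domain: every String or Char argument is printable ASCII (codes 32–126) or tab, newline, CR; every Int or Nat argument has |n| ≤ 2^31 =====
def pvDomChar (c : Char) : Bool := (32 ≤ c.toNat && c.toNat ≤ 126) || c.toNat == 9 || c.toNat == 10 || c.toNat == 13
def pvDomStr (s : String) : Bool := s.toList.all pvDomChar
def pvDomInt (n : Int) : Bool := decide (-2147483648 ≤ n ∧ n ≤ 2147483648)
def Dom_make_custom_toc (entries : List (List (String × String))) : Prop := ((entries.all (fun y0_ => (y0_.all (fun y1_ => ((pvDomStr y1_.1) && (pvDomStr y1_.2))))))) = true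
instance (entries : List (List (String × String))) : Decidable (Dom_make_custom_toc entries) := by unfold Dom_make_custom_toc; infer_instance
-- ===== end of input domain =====

-- B replaces A's by_area dict (built in one pass, then looked up per area) by a per-area inline
-- filter of `entries` inside the AREA_ORDER loop, assembled as header ++ blocks ++ footer;
-- objective: simpler (no speed claim).

-- ===== PORT A =====
def AREA_ORDER : List String := ["Plenary","Damage Mechanics","Optimization & Dynamic Response", "Delamination & Impact", "Novel Approaches", "Fracture Mechanics","Thin Ply", "Buckling / Stability","Structures","Multi-scale modeling","Novel Materials","Machine Learning I","Machine Learning II"]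

def LATEX_SPECIALS : PySem.Dict String String := PySem.Dict.ofList [
  ("\\", "\\textbackslash{}"), ("&", "\\&"), ("%", "\\%"), ("$", "\\$"), ("#", "\\#"),
  ("_", "\\_"), ("{", "\\{"), ("}", "\\}"), ("~", "\\textasciitilde{}"), ("^", "\\textasciicircum{}")]

-- latex_escape (the `text is None` branch never fires: the argument is always a str here)
def latexEscape (text : String) : String :=
  let text := PySem.Str.replace (PySem.Str.replace text "\r\n" "\n") "\r" "\n"
  PySem.Str.join "" (text.toList.map (fun ch => LATEX_SPECIALS.getD (String.singleton ch) (String.singleton ch)))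

def tocHeader : List String := ["\\pagestyle{empty}", "\\begin{center}", "\\LARGE Table of Contents", "\\end{center}", "\\vspace{1em}", "\\renewcommand{\\arraystretch}{1.35}", "\\setlength{\\tabcolsep}{6pt}", "\\noindent\\begin{longtable}{@{}>{\\bfseries}p{0.28\\textwidth} p{0.62\\textwidth} r@{}}", "\\textbf{Author} & \\textbf{Title} & \\textbf{Page}\\\\", "\\hline", "\\endfirsthead", "\\textbf{Author} & \\textbf{Title} & \\textbf{Page}\\\\", "\\hline", "\\endhead"]

def make_custom_toc (entries : List (List (String × String))) : List String :=
  let parts : List String := tocHeader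
  -- by_area = {a: [] for a in AREA_ORDER}
  let by_area : PySem.Dict String (List (List (String × String))) :=
    AREA_ORDER.foldl (fun d a => d.insert a []) PySem.Dict.empty
  -- for e in entries: a = e.get("area",""); if a in by_area: by_area[a].append(e)
  let by_area := entries.foldl (fun d e =>
    if d.contains (PySem.Dict.getD (PySem.Dict.mk e) "area" "") then
      d.modify (PySem.Dict.getD (PySem.Dict.mk e) "area" "") [] (fun g => g ++ [e])
    else d) by_area
  let parts := AREA_ORDER.foldl (fun parts area =>
    if PySem.Dict.getD by_area area [] = [] then parts
    else
      let area_tex := latexEscape area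
      let parts := parts ++ ["\\multicolumn{3}{@{}l@{}}{\\Large\\bfseries " ++ area_tex ++ "}\\\\[4pt]", "\\hline", "\\noalign{\\vskip 4pt}"]
      let parts := (PySem.Dict.getD by_area area []).foldl (fun parts e =>
        let ma := latexEscape (PySem.Dict.getD (PySem.Dict.mk e) "main_author" "")   -- e["main_author"] etc.: total getD form, exact under Pre_
        let ti := latexEscape (PySem.Dict.getD (PySem.Dict.mk e) "title" "")
        let link := "\\hyperlink{" ++ PySem.Dict.getD (PySem.Dict.mk e) "id" "" ++ "}{" ++ ti ++ "}"
        let page := "\\pageref{" ++ PySem.Dict.getD (PySem.Dict.mk e) "label" "" ++ "}"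
        parts ++ [ma ++ " & " ++ link ++ " & " ++ page ++ " \\\\", "\\noalign{\\vskip 3pt}"]) parts
      parts ++ ["\\noalign{\\vskip 8pt}"]) parts
  parts ++ ["\\end{longtable}", "\\clearpage", "\\pagestyle{fancy}"]

-- ===== PORT B =====
def rowB (e : List (String × String)) : String :=
  latexEscape (PySem.Dict.getD (PySem.Dict.mk e) "main_author" "") ++ " & " ++
    ("\\hyperlink{" ++ PySem.Dict.getD (PySem.Dict.mk e) "id" "" ++ "}{" ++ latexEscape (PySem.Dict.getD (PySem.Dict.mk e) "title" "") ++ "}") ++ " & " ++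
    ("\\pageref{" ++ PySem.Dict.getD (PySem.Dict.mk e) "label" "" ++ "}") ++ " \\\\"

def blockB (area : String) (entries : List (List (String × String))) : List String :=
  let group := entries.filter (fun e => PySem.Dict.getD (PySem.Dict.mk e) "area" "" == area)
  if group.isEmpty then []
  else
    ["\\multicolumn{3}{@{}l@{}}{\\Large\\bfseries " ++ latexEscape area ++ "}\\\\[4pt]", "\\hline", "\\noalign{\\vskip 4pt}"]
    ++ group.flatMap (fun e => [rowB e, "\\noalign{\\vskip 3pt}"])
    ++ ["\\noalign{\\vskip 8pt}"]

def make_custom_toc_alt (entries : List (List (String × String))) : List String :=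
  tocHeader ++ AREA_ORDER.flatMap (fun area => blockB area entries) ++ ["\\end{longtable}", "\\clearpage", "\\pagestyle{fancy}"]

-- ===== PRECONDITION & SPEC =====
-- Pre_ excludes exactly the inputs where Python A raises KeyError: an entry whose area
-- (e.get("area","")) is in AREA_ORDER but which lacks one of "main_author"/"title"/"id"/"label".
def Pre_make_custom_toc (entries : List (List (String × String))) : Prop :=
  ∀ e ∈ entries, PySem.Dict.getD (PySem.Dict.mk e) "area" "" ∈ AREA_ORDER →
    (PySem.Dict.contains (PySem.Dict.mk e) "main_author" = true ∧ PySem.Dict.contains (PySem.Dict.mk e) "title" = true ∧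
     PySem.Dict.contains (PySem.Dict.mk e) "id" = true ∧ PySem.Dict.contains (PySem.Dict.mk e) "label" = true)
instance (entries : List (List (String × String))) : Decidable (Pre_make_custom_toc entries) := by unfold Pre_make_custom_toc; infer_instance

def pvWitness_make_custom_toc : (List (List (String × String))) :=
  [[("area", "Plenary"), ("id", "p1"), ("label", "sec:p1"), ("main_author", "A. Smith"), ("title", "On % things_")],
   [("area", "Unknown"), ("id", "x")]]

def Spec_make_custom_toc (entries : List (List (String × String))) (out : List String) : Prop := out = make_custom_toc_alt entries
instance (entries : List (List (String × String))) (out : List String) : Decidable (Spec_make_custom_toc entries out) := by unfold Spec_make_custom_toc; infer_instance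

-- ===== CLAIM (what is proved, stated in full; the proofs are below) =====
def Claim_equal_make_custom_toc : Prop := ∀ (entries : List (List (String × String))), Dom_make_custom_toc entries → Pre_make_custom_toc entries → Spec_make_custom_toc entries (make_custom_toc entries)

-- ===== LEMMAS AND PROOFS =====

-- the dict-comprehension init: key membership and empty buckets
theorem contains_init (l : List String) (d : PySem.Dict String (List (List (String × String)))) (x : String) :
    (l.foldl (fun d a => d.insert a []) d).contains x = (d.contains x || l.contains x) := by
  induction l generalizing d with
  | nil => simp
  | cons a t ih =>
    simp only [List.foldl_cons, ih, PySem.Dict.contains_insert, List.contains_cons]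
    cases hxa : x == a <;> simp

theorem getD_init (l : List String) (d : PySem.Dict String (List (List (String × String)))) (x : String)
    (h : d.getD x [] = []) : (l.foldl (fun d a => d.insert a []) d).getD x [] = [] := by
  induction l generalizing d with
  | nil => exact h
  | cons a t ih =>
    simp only [List.foldl_cons]
    apply ih
    rw [PySem.Dict.getD_insert]
    split_ifs <;> simp [h]

-- the grouping loop: the bucket of `area` collects, in order, exactly the entries whose area is `area`
theorem getD_group_fold (entries : List (List (String × String)))
    (d : PySem.Dict String (List (List (String × String)))) (area : String)
    (hc : d.contains area = true) :
    PySem.Dict.getD (entries.foldl (fun d e =>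
        if d.contains (PySem.Dict.getD (PySem.Dict.mk e) "area" "") then
          d.modify (PySem.Dict.getD (PySem.Dict.mk e) "area" "") [] (fun g => g ++ [e])
        else d) d) area []
      = PySem.Dict.getD d area [] ++ entries.filter (fun e => PySem.Dict.getD (PySem.Dict.mk e) "area" "" == area) := by
  induction entries generalizing d with
  | nil => simp
  | cons e es ih =>
    simp only [List.foldl_cons, List.filter_cons]
    by_cases ha : PySem.Dict.getD (PySem.Dict.mk e) "area" "" = area
    · rw [ha, if_pos hc,
        ih _ (by rw [PySem.Dict.contains_modify]; simp [hc]),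
        PySem.Dict.getD_modify_self]
      simp
    · have hbne : (PySem.Dict.getD (PySem.Dict.mk e) "area" "" == area) = false := by simp [ha]
      rw [hbne]
      by_cases hc2 : d.contains (PySem.Dict.getD (PySem.Dict.mk e) "area" "") = true
      · rw [if_pos hc2,
          ih _ (by rw [PySem.Dict.contains_modify]; simp [hc]),
          PySem.Dict.getD_modify_of_ne _ _ _ (fun h => ha h.symm)]
        simp
      · rw [if_neg hc2, ih _ hc]
        simp

-- combining the two: A's bucket for an area of AREA_ORDER is B's filter
theorem bucket_eq (entries : List (List (String × String))) (area : String) (h : area ∈ AREA_ORDER) :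
    PySem.Dict.getD (entries.foldl (fun d e =>
        if d.contains (PySem.Dict.getD (PySem.Dict.mk e) "area" "") then
          d.modify (PySem.Dict.getD (PySem.Dict.mk e) "area" "") [] (fun g => g ++ [e])
        else d) (AREA_ORDER.foldl (fun d a => d.insert a []) PySem.Dict.empty)) area []
      = entries.filter (fun e => PySem.Dict.getD (PySem.Dict.mk e) "area" "" == area) := by
  rw [getD_group_fold _ _ _ (by rw [contains_init]; simp [h]),
    getD_init _ _ _ (by rw [PySem.Dict.getD_empty])]
  simp

theorem toc_eq (entries : List (List (String × String))) :
    make_custom_toc entries = make_custom_toc_alt entries := by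
  simp only [make_custom_toc, make_custom_toc_alt]
  rw [PySem.List.foldl_congr_mem AREA_ORDER _ (fun acc area => acc ++ blockB area entries) tocHeader ?_,
    PySem.List.foldl_append_eq_flatMap]
  intro acc area hmem
  rw [bucket_eq entries area hmem]
  by_cases hg : entries.filter (fun e => PySem.Dict.getD (PySem.Dict.mk e) "area" "" == area) = []
  · simp [blockB, hg]
  · rw [if_neg hg, PySem.List.foldl_append_eq_flatMap]
    simp [blockB, rowB, List.isEmpty_iff, hg]

-- ===== VERDICT (by name: the statement is the Claim_ definition above) =====
theorem make_custom_toc_spec : Claim_equal_make_custom_toc := by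
  intro entries _ _
  unfold Spec_make_custom_toc
  exact toc_eq entries
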